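-- pv_equiv track=rewrite | github.com/schneebergerlab/replicated-assemblies-centromere-study | bin/simulate.py | adjust_pos_coordinates
-- ===== SOURCE A (Python) =====
-- def adjust_pos_coordinates(pos1, pos2):
--     """Adjust pos1 coordinates based on pos2 instructions (INS/DEL)."""
--     adjusted_pos1_temp1 = pos1
--
--     for _, ins_del, p1, p2 in pos2:
--         adjusted_pos1_temp2 = []
--         for pos in adjusted_pos1_temp1:
--             if ins_del == "DEL":
--                 if pos < p1:
--                     adjusted_pos1_temp2.append(pos)  # no change to the positions smaller than p1
--                 elif p1 <= pos < p2:
--                     continue  # delete positions between p1 and p2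
--                 else:  # p2 <= pos
--                     adjusted_pos1_temp2.append(pos - (p2 - p1))
--             elif ins_del == "INS":
--                 if pos < p1:
--                     adjusted_pos1_temp2.append(pos)  # no change to the positions smaller than p1
--                 elif p1 <= pos < p2:
--                     adjusted_pos1_temp2.append(pos)  # insert/duplicate the positions between p1 and p2
--                     adjusted_pos1_temp2.append(pos + (p2 - p1))
--                 else:  # p2 <= pos
--                     adjusted_pos1_temp2.append(pos + (p2 - p1))
--         adjusted_pos1_temp1 = adjusted_pos1_temp2
--     return adjusted_pos1_temp1
-- ===== SOURCE B (Python) =====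
-- def _mn(a, b):
--     return b if a is None else min(a, b)
--
--
-- def _mx(a, b):
--     return b if a is None else max(a, b)
--
--
-- def adjust_pos_coordinates(pos1, pos2):
--     """Adjust pos1 coordinates based on pos2 instructions (INS/DEL)."""
--     # Compile pos2 once into an ordered list of affine pieces (lo, hi, shift):
--     # a source coordinate x with lo <= x < hi (None = unbounded) is emitted as
--     # x + shift.  Each instruction splits/shifts every piece; an INS whose span
--     # intersects a piece yields the duplicated interval twice (shift, shift+d),
--     # in the order A appends the duplicates.  pos1 is then evaluated once.
--     pieces = [(None, None, 0)]
--     for _, ins_del, p1, p2 in pos2: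
--         new = []
--
--         def add(lo, hi, s):
--             if lo is None or hi is None or lo < hi:
--                 new.append((lo, hi, s))
--
--         d = p2 - p1
--         for lo, hi, s in pieces:
--             if ins_del == "DEL":
--                 add(lo, _mn(hi, p1 - s), s)
--                 add(_mx(lo, max(p1, p2) - s), hi, s - d)
--             elif ins_del == "INS":
--                 add(lo, _mn(hi, p1 - s), s)
--                 add(_mx(lo, p1 - s), _mn(hi, p2 - s), s)
--                 add(_mx(lo, p1 - s), _mn(hi, p2 - s), s + d)
--                 add(_mx(lo, max(p1, p2) - s), hi, s + d)
--         pieces = new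
--     return [x + s for x in pos1
--             for lo, hi, s in pieces
--             if (lo is None or lo <= x) and (hi is None or x < hi)]
-- ===== Notes on version B (the rewrite author's own statement) =====
-- stated objective: alternative
-- what changed: B compiles the instruction list once into an ordered list of affine interval pieces (lo, hi, shift) by splitting/shifting pieces per instruction, then maps every position through that compiled piecewise map in a single evaluation pass, instead of A's repeated rewriting of the whole position list per instruction.
import Mathlib
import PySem

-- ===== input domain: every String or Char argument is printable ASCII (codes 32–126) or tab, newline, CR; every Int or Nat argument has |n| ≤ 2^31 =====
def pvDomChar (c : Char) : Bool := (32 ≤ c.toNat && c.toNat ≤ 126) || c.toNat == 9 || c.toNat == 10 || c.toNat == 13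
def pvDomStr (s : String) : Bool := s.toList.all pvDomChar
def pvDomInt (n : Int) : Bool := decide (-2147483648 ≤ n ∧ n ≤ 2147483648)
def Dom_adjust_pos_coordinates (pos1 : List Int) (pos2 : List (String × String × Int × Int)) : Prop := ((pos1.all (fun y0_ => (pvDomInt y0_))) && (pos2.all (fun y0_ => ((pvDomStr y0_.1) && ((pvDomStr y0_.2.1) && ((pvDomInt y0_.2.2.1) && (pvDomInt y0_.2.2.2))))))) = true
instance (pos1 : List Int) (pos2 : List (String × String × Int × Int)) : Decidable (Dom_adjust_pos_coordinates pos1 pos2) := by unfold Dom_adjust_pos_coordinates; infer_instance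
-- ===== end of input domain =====

-- B compiles pos2 once into an ordered list of affine interval pieces (lo, hi, shift)
-- and evaluates pos1 through that compiled map in one pass, instead of A's repeated
-- rewriting of the whole position list per instruction (alternative algorithm,
-- similar cost); return values proved equal on the whole domain.

-- ===== PORT A =====
-- inner loop body of A: one position appended (or not) to the accumulator list
def pvStepA (ins_del : String) (p1 p2 : Int) (acc : List Int) (pos : Int) : List Int :=
  if ins_del == "DEL" then
    if pos < p1 then acc ++ [pos]
    else if p1 ≤ pos ∧ pos < p2 then acc
    else acc ++ [pos - (p2 - p1)]
  else if ins_del == "INS" then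
    if pos < p1 then acc ++ [pos]
    else if p1 ≤ pos ∧ pos < p2 then acc ++ [pos] ++ [pos + (p2 - p1)]
    else acc ++ [pos + (p2 - p1)]
  else acc

def adjust_pos_coordinates (pos1 : List Int) (pos2 : List (String × String × Int × Int)) : List Int :=
  pos2.foldl (fun adjusted_pos1_temp1 instr =>
    adjusted_pos1_temp1.foldl (pvStepA instr.2.1 instr.2.2.1 instr.2.2.2) []) pos1

-- ===== PORT B =====
-- Source B's _mn / _mx: min/max of an optional bound (None = unbounded) and an int
def pvMn (a : Option Int) (b : Int) : Int :=
  match a with | none => b | some v => min v b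
def pvMx (a : Option Int) (b : Int) : Int :=
  match a with | none => b | some v => max v b

-- Source B's local 'add': append the piece unless its interval is provably empty
def pvAdd (new : List (Option Int × Option Int × Int)) (lo hi : Option Int) (s : Int) :
    List (Option Int × Option Int × Int) :=
  match lo, hi with
  | some a, some b => if a < b then new ++ [(lo, hi, s)] else new
  | _, _ => new ++ [(lo, hi, s)]

-- loop body of Source B's middle loop: the children of one piece under one instruction
def pvChildren (ins_del : String) (p1 p2 : Int)
    (new : List (Option Int × Option Int × Int)) (pc : Option Int × Option Int × Int) :
    List (Option Int × Option Int × Int) :=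
  let lo := pc.1; let hi := pc.2.1; let s := pc.2.2
  let d := p2 - p1
  if ins_del == "DEL" then
    pvAdd (pvAdd new lo (some (pvMn hi (p1 - s))) s)
      (some (pvMx lo (max p1 p2 - s))) hi (s - d)
  else if ins_del == "INS" then
    pvAdd (pvAdd (pvAdd (pvAdd new lo (some (pvMn hi (p1 - s))) s)
      (some (pvMx lo (p1 - s))) (some (pvMn hi (p2 - s))) s)
      (some (pvMx lo (p1 - s))) (some (pvMn hi (p2 - s))) (s + d))
      (some (pvMx lo (max p1 p2 - s))) hi (s + d)
  else new

-- one instruction applied to the current piece list (Source B's middle loop)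
def pvStepPieces (ins_del : String) (p1 p2 : Int)
    (pieces : List (Option Int × Option Int × Int)) :
    List (Option Int × Option Int × Int) :=
  pieces.foldl (pvChildren ins_del p1 p2) []

-- membership test of the final comprehension
def pvContains (lo hi : Option Int) (x : Int) : Bool :=
  (match lo with | none => true | some a => a ≤ x) &&
  (match hi with | none => true | some b => x < b)

def adjust_pos_coordinates_alt (pos1 : List Int) (pos2 : List (String × String × Int × Int)) : List Int :=
  let pieces := pos2.foldl
    (fun ps instr => pvStepPieces instr.2.1 instr.2.2.1 instr.2.2.2 ps)
    [(none, none, 0)]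
  pos1.flatMap (fun x =>
    pieces.flatMap (fun pc => if pvContains pc.1 pc.2.1 x then [x + pc.2.2] else []))

-- ===== PRECONDITION & SPEC =====
def Spec_adjust_pos_coordinates (pos1 : List Int) (pos2 : List (String × String × Int × Int)) (out : List Int) : Prop := out = adjust_pos_coordinates_alt pos1 pos2
instance (pos1 : List Int) (pos2 : List (String × String × Int × Int)) (out : List Int) : Decidable (Spec_adjust_pos_coordinates pos1 pos2 out) := by unfold Spec_adjust_pos_coordinates; infer_instance

-- ===== CLAIM (what is proved, stated in full; the proofs are below) =====
def Claim_equal_adjust_pos_coordinates : Prop := ∀ (pos1 : List Int) (pos2 : List (String × String × Int × Int)), Dom_adjust_pos_coordinates pos1 pos2 → Spec_adjust_pos_coordinates pos1 pos2 (adjust_pos_coordinates pos1 pos2)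

-- ===== LEMMAS AND PROOFS =====

-- proof-side: images of one position under one instruction (A's branch logic, element-wise)
def pvApplyOne (ins_del : String) (p1 p2 : Int) (x : Int) : List Int :=
  if ins_del == "DEL" then
    if x < p1 then [x]
    else if p1 ≤ x ∧ x < p2 then []
    else [x - (p2 - p1)]
  else if ins_del == "INS" then
    if x < p1 then [x]
    else if p1 ≤ x ∧ x < p2 then [x, x + (p2 - p1)]
    else [x + (p2 - p1)]
  else []

-- proof-side: positions emitted by a piece list at a single coordinate x
def pvEval (pieces : List (Option Int × Option Int × Int)) (x : Int) : List Int :=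
  pieces.flatMap (fun pc => if pvContains pc.1 pc.2.1 x then [x + pc.2.2] else [])

-- A's inner loop over a list is acc ++ flatMap of the per-element images
lemma stepA_eq_flatMap (i : String) (p1 p2 : Int) (l acc : List Int) :
    l.foldl (pvStepA i p1 p2) acc = acc ++ l.flatMap (pvApplyOne i p1 p2) := by
  induction l generalizing acc with
  | nil => simp
  | cons x xs ih =>
      simp only [List.foldl_cons, List.flatMap_cons, ih]
      rw [← List.append_assoc]
      congr 1
      unfold pvStepA pvApplyOne
      split_ifs <;> simp_all

-- proof-side: what one piece emits at coordinate x
def pvEmit (lo hi : Option Int) (s x : Int) : List Int :=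
  if pvContains lo hi x then [x + s] else []

-- evaluating pvAdd: a pruned piece contains nothing
lemma pvEval_pvAdd (new : List (Option Int × Option Int × Int)) (lo hi : Option Int) (s x : Int) :
    pvEval (pvAdd new lo hi s) x = pvEval new x ++ pvEmit lo hi s x := by
  unfold pvAdd pvEmit
  cases lo with
  | none => simp [pvEval]
  | some a => cases hi with
    | none => simp [pvEval]
    | some b =>
        by_cases hab : a < b
        · simp [hab, pvEval]
        · have hc : pvContains (some a) (some b) x = false := by
            simp only [pvContains, Bool.and_eq_true, decide_eq_true_eq,
              Bool.and_eq_false_iff, decide_eq_false_iff_not]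
            omega
          simp [hab, hc]

-- the two DEL children of a piece emit exactly A's DEL branch at x + s
lemma del_emits (p1 p2 : Int) (lo hi : Option Int) (s x : Int) :
    pvEmit lo (some (pvMn hi (p1 - s))) s x
      ++ pvEmit (some (pvMx lo (max p1 p2 - s))) hi (s - (p2 - p1)) x
    = if pvContains lo hi x then
        (if x + s < p1 then [x + s]
         else if p1 ≤ x + s ∧ x + s < p2 then []
         else [x + s - (p2 - p1)])
      else [] := by
  cases lo <;> cases hi <;>
    simp only [pvEmit, pvContains, pvMn, pvMx, min_def, max_def, decide_eq_true_eq,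
      Bool.true_and, Bool.and_true, Bool.and_eq_true] <;>
    split_ifs <;>
    (try (exfalso; omega)) <;> (try rfl) <;>
    (simp only [List.nil_append, List.append_nil, List.singleton_append, List.cons_append,
      List.cons.injEq, List.cons_ne_nil, and_true, true_and, and_self, List.nil_eq]; omega)

-- the four INS children of a piece emit exactly A's INS branch at x + s
set_option maxHeartbeats 1600000 in
lemma ins_emits (p1 p2 : Int) (lo hi : Option Int) (s x : Int) :
    pvEmit lo (some (pvMn hi (p1 - s))) s x
      ++ (pvEmit (some (pvMx lo (p1 - s))) (some (pvMn hi (p2 - s))) s x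
      ++ (pvEmit (some (pvMx lo (p1 - s))) (some (pvMn hi (p2 - s))) (s + (p2 - p1)) x
      ++ pvEmit (some (pvMx lo (max p1 p2 - s))) hi (s + (p2 - p1)) x))
    = if pvContains lo hi x then
        (if x + s < p1 then [x + s]
         else if p1 ≤ x + s ∧ x + s < p2 then [x + s, x + s + (p2 - p1)]
         else [x + s + (p2 - p1)])
      else [] := by
  cases lo <;> cases hi <;>
    simp only [pvEmit, pvContains, pvMn, pvMx, min_def, max_def, decide_eq_true_eq,
      Bool.true_and, Bool.and_true, Bool.and_eq_true] <;>
    split_ifs <;>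
    (try (exfalso; omega)) <;> (try rfl) <;>
    (simp only [List.nil_append, List.append_nil, List.singleton_append, List.cons_append,
      List.cons.injEq, List.cons_ne_nil, and_true, true_and, and_self, List.nil_eq]; omega)

-- the children of one piece, evaluated at x, are A's branch logic applied at x + shift
lemma pvEval_children (i : String) (p1 p2 : Int)
    (new : List (Option Int × Option Int × Int)) (pc : Option Int × Option Int × Int) (x : Int) :
    pvEval (pvChildren i p1 p2 new pc) x
      = pvEval new x ++
          (if pvContains pc.1 pc.2.1 x then pvApplyOne i p1 p2 (x + pc.2.2) else []) := by
  obtain ⟨lo, hi, s⟩ := pc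
  unfold pvChildren
  by_cases h1 : i = "DEL"
  · simp only [h1, beq_self_eq_true, if_pos]
    rw [pvEval_pvAdd, pvEval_pvAdd, List.append_assoc, del_emits]
    simp [pvApplyOne]
  · by_cases h2 : i = "INS"
    · subst h2
      rw [if_neg (by decide : ¬ ((("INS" : String) == "DEL") = true)),
        if_pos (by decide : ((("INS" : String) == "INS") = true)),
        pvEval_pvAdd, pvEval_pvAdd, pvEval_pvAdd, pvEval_pvAdd,
        List.append_assoc, List.append_assoc, List.append_assoc, ins_emits]
      simp [pvApplyOne]
    · have hd : (i == "DEL") = false := by simp [h1]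
      have hi2 : (i == "INS") = false := by simp [h2]
      simp [hd, hi2, pvApplyOne]

-- one instruction on a whole piece list = element-wise images of its evaluation
lemma pvEval_step (i : String) (p1 p2 : Int)
    (pieces : List (Option Int × Option Int × Int)) (x : Int) :
    pvEval (pvStepPieces i p1 p2 pieces) x
      = (pvEval pieces x).flatMap (pvApplyOne i p1 p2) := by
  unfold pvStepPieces
  suffices h : ∀ new, pvEval (pieces.foldl (pvChildren i p1 p2) new) x
      = pvEval new x ++ (pvEval pieces x).flatMap (pvApplyOne i p1 p2) by
    simpa [pvEval] using h []
  induction pieces with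
  | nil => intro new; simp [pvEval]
  | cons pc rest ih =>
      intro new
      rw [List.foldl_cons, ih, pvEval_children, List.append_assoc]
      congr 1
      have : pvEval (pc :: rest) x
          = (if pvContains pc.1 pc.2.1 x then [x + pc.2.2] else []) ++ pvEval rest x := by
        simp [pvEval]
      rw [this, List.flatMap_append]
      congr 1
      split_ifs <;> simp

-- applying all instructions element-wise to the empty list yields the empty list
lemma fold_flatMap_nil (pos2 : List (String × String × Int × Int)) :
    pos2.foldl (fun cur instr => cur.flatMap (pvApplyOne instr.2.1 instr.2.2.1 instr.2.2.2)) [] = [] := by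
  induction pos2 with
  | nil => rfl
  | cons q qs ih => simpa using ih

-- element-wise application distributes over ++
lemma fold_flatMap_append (pos2 : List (String × String × Int × Int)) (l1 l2 : List Int) :
    pos2.foldl (fun cur instr => cur.flatMap (pvApplyOne instr.2.1 instr.2.2.1 instr.2.2.2)) (l1 ++ l2)
      = pos2.foldl (fun cur instr => cur.flatMap (pvApplyOne instr.2.1 instr.2.2.1 instr.2.2.2)) l1
        ++ pos2.foldl (fun cur instr => cur.flatMap (pvApplyOne instr.2.1 instr.2.2.1 instr.2.2.2)) l2 := by
  induction pos2 generalizing l1 l2 with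
  | nil => simp
  | cons q qs ih => simp only [List.foldl_cons, List.flatMap_append, ih]

-- the compiled piece list evaluates to the sequential per-position images
lemma pvEval_fold (pos2 : List (String × String × Int × Int))
    (pieces : List (Option Int × Option Int × Int)) (x : Int) :
    pvEval (pos2.foldl (fun ps instr => pvStepPieces instr.2.1 instr.2.2.1 instr.2.2.2 ps) pieces) x
      = pos2.foldl (fun cur instr => cur.flatMap (pvApplyOne instr.2.1 instr.2.2.1 instr.2.2.2))
          (pvEval pieces x) := by
  induction pos2 generalizing pieces with
  | nil => rfl
  | cons q qs ih => rw [List.foldl_cons, List.foldl_cons, ih, pvEval_step]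

-- the two ports compute the same list on every input
lemma ports_agree (pos1 : List Int) (pos2 : List (String × String × Int × Int)) :
    adjust_pos_coordinates pos1 pos2 = adjust_pos_coordinates_alt pos1 pos2 := by
  unfold adjust_pos_coordinates adjust_pos_coordinates_alt
  have hA : ∀ l : List Int,
      pos2.foldl (fun t instr => t.foldl (pvStepA instr.2.1 instr.2.2.1 instr.2.2.2) []) l
        = pos2.foldl (fun cur instr => cur.flatMap (pvApplyOne instr.2.1 instr.2.2.1 instr.2.2.2)) l := by
    intro l
    induction pos2 generalizing l with
    | nil => rfl
    | cons q qs ih => rw [List.foldl_cons, List.foldl_cons, stepA_eq_flatMap, List.nil_append, ih]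
  rw [hA]
  have hB : ∀ x : Int,
      pvEval (pos2.foldl (fun ps instr => pvStepPieces instr.2.1 instr.2.2.1 instr.2.2.2 ps)
        [(none, none, 0)]) x
      = pos2.foldl (fun cur instr => cur.flatMap (pvApplyOne instr.2.1 instr.2.2.1 instr.2.2.2)) [x] := by
    intro x
    rw [pvEval_fold]
    simp [pvEval, pvContains]
  show _ = pos1.flatMap fun x => pvEval _ x
  induction pos1 with
  | nil => exact fold_flatMap_nil pos2
  | cons x xs ih =>
      rw [List.flatMap_cons, hB, show (x :: xs) = [x] ++ xs from rfl,
        fold_flatMap_append, ih]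

-- ===== VERDICT (by name: the statement is the Claim_ definition above) =====
theorem adjust_pos_coordinates_spec : Claim_equal_adjust_pos_coordinates := by
  intro pos1 pos2 _
  exact ports_agree pos1 pos2
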